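-- pv_equiv track=rewrite | github.com/queelius/computational-explorations | src/sidon_disjoint.py | is_sidon
-- ===== SOURCE A (Python) =====
-- from typing import Set, List, Tuple, Optional
--
-- def is_sidon(A: Set[int]) -> bool:
--     """Check if A is a Sidon set (all pairwise sums distinct)."""
--     A_list = sorted(A)
--     sums = set()
--     for i, a in enumerate(A_list):
--         for b in A_list[i:]:  # Include a + a
--             s = a + b
--             if s in sums:
--                 return False
--             sums.add(s)
--     return True
-- ===== SOURCE B (Python) =====
-- def is_sidon(A):
--     """Check if A is a Sidon set via the equivalent criterion: all pairwise
--     differences of distinct elements are distinct.  The differences are poured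
--     into a set row by row and the set's cardinality is compared with the number
--     of pairs seen so far; a deficit means a repeated difference."""
--     L = sorted(A)
--     diffs = set()
--     count = 0
--     for k, x in enumerate(L):
--         for y in L[k + 1:]:
--             diffs.add(y - x)
--             count += 1
--         if len(diffs) != count:
--             return False
--     return True
-- ===== Notes on version B (the rewrite author's own statement) =====
-- stated objective: alternative
-- what changed: B decides Sidon-ness via the equivalent B2 criterion on pairwise DIFFERENCES: it pours the differences y-x over sorted pairs x<y into a set row by row and compares the set's cardinality with the pair count, instead of A's nested loop that tests and accumulates pairwise sums (including a+a) with a per-element early return.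
import Mathlib
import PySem

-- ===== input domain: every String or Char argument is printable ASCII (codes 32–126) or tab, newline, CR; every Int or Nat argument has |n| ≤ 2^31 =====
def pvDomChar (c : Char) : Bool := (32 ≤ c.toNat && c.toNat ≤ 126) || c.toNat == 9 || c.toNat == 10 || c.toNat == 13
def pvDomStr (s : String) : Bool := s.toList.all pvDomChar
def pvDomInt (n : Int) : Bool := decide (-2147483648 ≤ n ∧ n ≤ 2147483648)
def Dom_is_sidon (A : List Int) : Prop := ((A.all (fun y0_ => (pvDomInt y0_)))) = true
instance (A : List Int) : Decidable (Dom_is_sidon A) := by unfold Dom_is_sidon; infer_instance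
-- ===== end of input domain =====

-- B decides Sidon-ness via the equivalent B2 criterion on pairwise differences of distinct
-- elements instead of A's early-return accumulation of pairwise sums (including a+a).

-- ===== PORT A =====
-- inner loop 'for b in A_list[i:]': none = the 'return False' on a repeated sum
def pvInnerA (a : Int) : List Int → PySem.Set Int → Option (PySem.Set Int)
  | [], sums => some sums
  | b :: bs, sums =>
      let s := a + b
      if PySem.Set.contains sums s then none
      else pvInnerA a bs (PySem.Set.add sums s)

-- outer loop 'for i, a in enumerate(A_list)': the remaining list IS A_list[i:]
def pvOuterA : List Int → PySem.Set Int → Bool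
  | [], _ => true
  | a :: rest, sums =>
      match pvInnerA a (a :: rest) sums with
      | none => false
      | some sums' => pvOuterA rest sums'

def is_sidon (A : List Int) : Bool :=
  pvOuterA (PySem.List.sorted A (fun x => x) false) PySem.Set.empty

-- ===== PORT B =====
-- outer 'for k, x in enumerate(L)': the remaining list is L[k:], its tail L[k+1:];
-- the inner 'for y in L[k+1:]: diffs.add(y - x); count += 1' is the foldl over that tail
def pvRowsB : List Int → PySem.Set Int → Nat → Bool
  | [], _, _ => true
  | x :: rest, diffs, count =>
      let st := rest.foldl (fun (p : PySem.Set Int × Nat) y => (PySem.Set.add p.1 (y - x), p.2 + 1)) (diffs, count)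
      if PySem.Set.len st.1 ≠ st.2 then false
      else pvRowsB rest st.1 st.2

def is_sidon_alt (A : List Int) : Bool :=
  pvRowsB (PySem.List.sorted A (fun x => x) false) PySem.Set.empty 0

-- ===== PRECONDITION & SPEC =====
-- A's parameter is a Python set (Set[int]); Pre_ excludes lists with duplicate elements, which
-- do not encode a set and on which the sum and difference criteria legitimately diverge.
def Pre_is_sidon (A : List Int) : Prop := A.Nodup
instance (A : List Int) : Decidable (Pre_is_sidon A) := by unfold Pre_is_sidon; infer_instance
def pvWitness_is_sidon : List Int := ([0, 1, 3])
def Spec_is_sidon (A : List Int) (out : Bool) : Prop := out = is_sidon_alt A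
instance (A : List Int) (out : Bool) : Decidable (Spec_is_sidon A out) := by unfold Spec_is_sidon; infer_instance

-- ===== CLAIM (what is proved, stated in full; the proofs are below) =====
def Claim_equal_is_sidon : Prop := ∀ (A : List Int), Dom_is_sidon A → Pre_is_sidon A → Spec_is_sidon A (is_sidon A)

-- ===== LEMMAS AND PROOFS =====

-- the multiset of pairwise sums A accumulates, in A's traversal order
def pvSums : List Int → List Int
  | [] => []
  | x :: rest => (x :: rest).map (fun y => x + y) ++ pvSums rest

-- ordered pairs (i ≤ j resp. i < j) underlying the two multisets
def pvPairsS : List Int → List (Int × Int)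
  | [] => []
  | x :: rest => (x :: rest).map (fun y => (x, y)) ++ pvPairsS rest

def pvPairsD : List Int → List (Int × Int)
  | [] => []
  | x :: rest => rest.map (fun y => (x, y)) ++ pvPairsD rest

lemma pvInnerA_spec (a : Int) : ∀ (bs : List Int) (S : PySem.Set Int), S.Nodup →
    pvInnerA a bs S =
      if (S ++ bs.map (fun y => a + y)).Nodup then some (S ++ bs.map (fun y => a + y)) else none := by
  intro bs
  induction bs with
  | nil => intro S hS; simp [pvInnerA, hS]
  | cons b bs ih =>
    intro S hS
    simp only [pvInnerA]
    by_cases hm : (a + b) ∈ S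
    · rw [if_pos (by simpa [PySem.Set.contains_iff] using hm)]
      rw [if_neg]
      intro hnd
      exact (List.disjoint_of_nodup_append hnd) hm (by simp)
    · rw [if_neg (by simpa [PySem.Set.contains_iff] using hm)]
      rw [PySem.Set.add_of_not_mem hm]
      have hS' : (S ++ [a + b]).Nodup := by
        rw [List.nodup_append]
        refine ⟨hS, by simp, ?_⟩
        intro z hz w hw
        rw [List.mem_singleton] at hw
        subst hw
        exact fun h => hm (h ▸ hz)
      rw [ih _ hS']
      simp [List.append_assoc]

lemma pvOuterA_spec : ∀ (L : List Int) (S : PySem.Set Int), S.Nodup →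
    pvOuterA L S = decide (S ++ pvSums L).Nodup := by
  intro L
  induction L with
  | nil => intro S hS; simp [pvOuterA, pvSums, hS]
  | cons a rest ih =>
    intro S hS
    simp only [pvOuterA]
    rw [pvInnerA_spec a (a :: rest) S hS]
    by_cases h : (S ++ (a :: rest).map (fun y => a + y)).Nodup
    · rw [if_pos h]
      have hres := ih _ h
      simp only [hres, pvSums]
      congr 1
      rw [List.append_assoc]
    · rw [if_neg h]
      simp only [pvSums]
      symm
      rw [decide_eq_false_iff_not]
      intro hnd
      apply h
      rw [← List.append_assoc] at hnd
      exact (List.sublist_append_left _ _).nodup hnd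

lemma is_sidon_eq (A : List Int) :
    is_sidon A = decide (pvSums (PySem.List.sorted A (fun x => x) false)).Nodup := by
  rw [is_sidon, pvOuterA_spec _ _ (by simp [PySem.Set.empty])]
  simp [PySem.Set.empty]

lemma length_ofList_eq_iff (l : List Int) :
    (PySem.Set.ofList l).length = l.length ↔ l.Nodup := by
  induction l using List.reverseRecOn with
  | nil => simp [PySem.Set.ofList]
  | append_singleton xs x ih =>
    rw [PySem.Set.ofList_append_singleton, PySem.Set.add_eq_ite]
    have hle := PySem.Set.length_ofList_le (xs := xs)
    by_cases hm : x ∈ PySem.Set.ofList xs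
    · rw [if_pos hm]
      rw [PySem.Set.mem_ofList] at hm
      simp only [List.length_append, List.length_singleton]
      constructor
      · intro hlen; omega
      · intro hnd
        rw [List.nodup_append] at hnd
        exact absurd rfl (hnd.2.2 x hm x (by simp))
    · rw [if_neg hm]
      rw [PySem.Set.mem_ofList] at hm
      simp only [List.length_append, List.length_singleton]
      rw [List.nodup_append]
      constructor
      · intro hlen
        refine ⟨ih.mp (by omega), by simp, ?_⟩
        intro z hz w hw
        rw [List.mem_singleton] at hw
        subst hw
        exact fun h => hm (h ▸ hz)
      · intro ⟨h1, _, _⟩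
        rw [ih.mpr h1]

-- the list of differences B's loop pours into its set, in traversal order
def pvDiffsB : List Int → List Int
  | [] => []
  | x :: rest => rest.map (fun y => y - x) ++ pvDiffsB rest

lemma pvRowB_foldl (x : Int) : ∀ (rest : List Int) (S : PySem.Set Int) (c : Nat),
    rest.foldl (fun (p : PySem.Set Int × Nat) y => (PySem.Set.add p.1 (y - x), p.2 + 1)) (S, c)
      = (PySem.Set.update S (rest.map (fun y => y - x)), c + rest.length) := by
  intro rest
  induction rest with
  | nil => intro S c; simp [PySem.Set.update_nil]
  | cons y ys ih =>
    intro S c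
    simp only [List.foldl_cons, List.map_cons, List.length_cons, ih, PySem.Set.update_cons]
    refine congrArg _ ?_
    omega

lemma pvRowsB_spec : ∀ (L : List Int) (P : List Int), P.Nodup →
    pvRowsB L (PySem.Set.ofList P) P.length = decide ((P ++ pvDiffsB L).Nodup) := by
  intro L
  induction L with
  | nil => intro P hP; simp [pvRowsB, pvDiffsB, hP]
  | cons x rest ih =>
    intro P hP
    simp only [pvRowsB, pvRowB_foldl]
    rw [← PySem.Set.ofList_append]
    have hlen : (P ++ rest.map (fun y => y - x)).length = P.length + rest.length := by simp
    by_cases hnd : (P ++ rest.map (fun y => y - x)).Nodup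
    · rw [if_neg (by
        have hof := PySem.Set.ofList_eq_self_of_nodup _ hnd
        simp [PySem.Set.len, hof, hlen])]
      rw [← hlen, ih _ hnd]
      simp only [pvDiffsB]
      congr 1
      rw [List.append_assoc]
    · have h1 : (PySem.Set.ofList (P ++ rest.map (fun y => y - x))).length
          ≠ (P ++ rest.map (fun y => y - x)).length :=
        fun h => hnd ((length_ofList_eq_iff _).mp h)
      rw [if_pos (by
        simp only [PySem.Set.len, ne_eq]
        exact fun hc => h1 (by rw [hlen]; exact_mod_cast hc))]
      symm
      rw [decide_eq_false_iff_not]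
      simp only [pvDiffsB]
      intro h
      rw [← List.append_assoc] at h
      exact hnd ((List.sublist_append_left _ _).nodup h)

lemma is_sidon_alt_eq (A : List Int) :
    is_sidon_alt A = decide (pvDiffsB (PySem.List.sorted A (fun x => x) false)).Nodup := by
  have h := pvRowsB_spec (PySem.List.sorted A (fun x => x) false) [] (by simp)
  simpa [is_sidon_alt, PySem.Set.ofList, PySem.Set.empty] using h

lemma pvSums_eq_map (L : List Int) : pvSums L = (pvPairsS L).map (fun p => p.1 + p.2) := by
  induction L with
  | nil => simp [pvSums, pvPairsS]
  | cons x r ih => simp [pvSums, pvPairsS, ih, Function.comp]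

lemma pvDiffsB_eq_map (L : List Int) : pvDiffsB L = (pvPairsD L).map (fun p => p.2 - p.1) := by
  induction L with
  | nil => simp [pvDiffsB, pvPairsD]
  | cons x r ih => simp [pvDiffsB, pvPairsD, ih, Function.comp]

lemma mem_pvPairsS : ∀ {L : List Int}, L.Pairwise (· < ·) → ∀ {a b : Int},
    ((a, b) ∈ pvPairsS L ↔ a ∈ L ∧ b ∈ L ∧ a ≤ b)
  | [], _, a, b => by simp [pvPairsS]
  | x :: r, h, a, b => by
    rw [List.pairwise_cons] at h
    obtain ⟨hx, hr⟩ := h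
    simp only [pvPairsS, List.mem_append, List.mem_map, List.mem_cons,
      mem_pvPairsS hr, Prod.mk.injEq]
    constructor
    · rintro (⟨y, hy, hax, hby⟩ | ⟨ha, hb, hab⟩)
      · subst hax; subst hby
        rcases hy with hy | hy
        · exact ⟨Or.inl rfl, Or.inl hy, le_of_eq hy.symm⟩
        · exact ⟨Or.inl rfl, Or.inr hy, le_of_lt (hx _ hy)⟩
      · exact ⟨Or.inr ha, Or.inr hb, hab⟩
    · rintro ⟨ha | ha, hb, hab⟩
      · subst ha
        exact Or.inl ⟨b, by simpa using hb, rfl, rfl⟩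
      · have hxb : x < b := lt_of_lt_of_le (hx a ha) hab
        rcases hb with hb | hb
        · exact absurd (hb ▸ hxb) (lt_irrefl _)
        · exact Or.inr ⟨ha, hb, hab⟩

lemma mem_pvPairsD : ∀ {L : List Int}, L.Pairwise (· < ·) → ∀ {a b : Int},
    ((a, b) ∈ pvPairsD L ↔ a ∈ L ∧ b ∈ L ∧ a < b)
  | [], _, a, b => by simp [pvPairsD]
  | x :: r, h, a, b => by
    rw [List.pairwise_cons] at h
    obtain ⟨hx, hr⟩ := h
    simp only [pvPairsD, List.mem_append, List.mem_map, List.mem_cons,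
      mem_pvPairsD hr, Prod.mk.injEq]
    constructor
    · rintro (⟨y, hy, hax, hby⟩ | ⟨ha, hb, hab⟩)
      · subst hax; subst hby
        exact ⟨Or.inl rfl, Or.inr hy, hx _ hy⟩
      · exact ⟨Or.inr ha, Or.inr hb, hab⟩
    · rintro ⟨ha | ha, hb, hab⟩
      · subst ha
        rcases hb with hb | hb
        · exact absurd hab (by rw [hb]; exact lt_irrefl _)
        · exact Or.inl ⟨b, hb, rfl, rfl⟩
      · have hxb : x < b := lt_trans (hx a ha) hab
        rcases hb with hb | hb
        · exact absurd (hb ▸ hxb) (lt_irrefl _)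
        · exact Or.inr ⟨ha, hb, hab⟩

lemma pvPairsS_fst_mem : ∀ {L : List Int} {p : Int × Int}, p ∈ pvPairsS L → p.1 ∈ L
  | [], p => by simp [pvPairsS]
  | x :: r, p => by
    simp only [pvPairsS, List.mem_append, List.mem_map]
    rintro (⟨y, _, rfl⟩ | hp)
    · simp
    · exact List.mem_cons_of_mem _ (pvPairsS_fst_mem hp)

lemma pvPairsD_fst_mem : ∀ {L : List Int} {p : Int × Int}, p ∈ pvPairsD L → p.1 ∈ L
  | [], p => by simp [pvPairsD]
  | x :: r, p => by
    simp only [pvPairsD, List.mem_append, List.mem_map]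
    rintro (⟨y, _, rfl⟩ | hp)
    · simp
    · exact List.mem_cons_of_mem _ (pvPairsD_fst_mem hp)

lemma nodup_pvPairsS : ∀ {L : List Int}, L.Pairwise (· < ·) → (pvPairsS L).Nodup
  | [], _ => by simp [pvPairsS]
  | x :: r, h => by
    rw [List.pairwise_cons] at h
    obtain ⟨hx, hr⟩ := h
    have hnr : (x :: r).Nodup := by
      refine List.Pairwise.imp ?_ (List.pairwise_cons.mpr ⟨hx, hr⟩)
      exact fun h => ne_of_lt h
    simp only [pvPairsS, List.nodup_append]
    refine ⟨hnr.map (fun y z hyz => by simpa using hyz), nodup_pvPairsS hr, ?_⟩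
    intro p hp q hq hpq
    subst hpq
    simp only [List.mem_map] at hp
    obtain ⟨y, _, rfl⟩ := hp
    have := pvPairsS_fst_mem hq
    exact absurd (hx x this) (lt_irrefl _)

lemma nodup_pvPairsD : ∀ {L : List Int}, L.Pairwise (· < ·) → (pvPairsD L).Nodup
  | [], _ => by simp [pvPairsD]
  | x :: r, h => by
    rw [List.pairwise_cons] at h
    obtain ⟨hx, hr⟩ := h
    have hnr : r.Nodup := hr.imp (fun h => ne_of_lt h)
    simp only [pvPairsD, List.nodup_append]
    refine ⟨hnr.map (fun y z hyz => by simpa using hyz), nodup_pvPairsD hr, ?_⟩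
    intro p hp q hq hpq
    subst hpq
    simp only [List.mem_map] at hp
    obtain ⟨y, _, rfl⟩ := hp
    have := pvPairsD_fst_mem hq
    exact absurd (hx x this) (lt_irrefl _)

-- the mathematical core: pairwise sums (with repetition) are distinct iff pairwise
-- differences of distinct elements are distinct
lemma sum_inj_iff_diff_inj (L : List Int) :
    (∀ a b c d : Int, a ∈ L → b ∈ L → c ∈ L → d ∈ L → a ≤ b → c ≤ d → a + b = c + d → a = c ∧ b = d)
    ↔ (∀ a b c d : Int, a ∈ L → b ∈ L → c ∈ L → d ∈ L → a < b → c < d → b - a = d - c → a = c ∧ b = d) := by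
  constructor
  · intro H a b c d ha hb hc hd hab hcd he
    rcases le_total a d with h1 | h1
    · rcases le_total c b with h2 | h2
      · have := H a d c b ha hd hc hb h1 h2 (by omega)
        omega
      · have := H a d b c ha hd hb hc h1 h2 (by omega)
        omega
    · rcases le_total c b with h2 | h2
      · have := H d a c b hd ha hc hb h1 h2 (by omega)
        omega
      · have := H d a b c hd ha hb hc h1 h2 (by omega)
        omega
  · intro H a b c d ha hb hc hd hab hcd he
    by_cases hac : a = c
    · omega
    · rcases lt_or_gt_of_ne hac with h1 | h1
      · have hdb : d < b := by omega
        have := H a c d b ha hc hd hb h1 hdb (by omega)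
        omega
      · have hbd : b < d := by omega
        have := H c a b d hc ha hb hd h1 hbd (by omega)
        omega

lemma nodup_sums_iff_nodup_diffs {L : List Int} (h : L.Pairwise (· < ·)) :
    (pvSums L).Nodup ↔ (pvDiffsB L).Nodup := by
  rw [pvSums_eq_map, pvDiffsB_eq_map,
    List.nodup_map_iff_inj_on (nodup_pvPairsS h), List.nodup_map_iff_inj_on (nodup_pvPairsD h)]
  have hS : (∀ p ∈ pvPairsS L, ∀ q ∈ pvPairsS L, p.1 + p.2 = q.1 + q.2 → p = q) ↔
      (∀ a b c d : Int, a ∈ L → b ∈ L → c ∈ L → d ∈ L → a ≤ b → c ≤ d → a + b = c + d → a = c ∧ b = d) := by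
    constructor
    · intro H a b c d ha hb hc hd hab hcd he
      have := H (a, b) ((mem_pvPairsS h).mpr ⟨ha, hb, hab⟩) (c, d) ((mem_pvPairsS h).mpr ⟨hc, hd, hcd⟩) he
      exact ⟨congrArg Prod.fst this, congrArg Prod.snd this⟩
    · rintro H ⟨a, b⟩ hp ⟨c, d⟩ hq he
      obtain ⟨ha, hb, hab⟩ := (mem_pvPairsS h).mp hp
      obtain ⟨hc, hd, hcd⟩ := (mem_pvPairsS h).mp hq
      obtain ⟨h1, h2⟩ := H a b c d ha hb hc hd hab hcd he
      simp [h1, h2]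
  have hD : (∀ p ∈ pvPairsD L, ∀ q ∈ pvPairsD L, p.2 - p.1 = q.2 - q.1 → p = q) ↔
      (∀ a b c d : Int, a ∈ L → b ∈ L → c ∈ L → d ∈ L → a < b → c < d → b - a = d - c → a = c ∧ b = d) := by
    constructor
    · intro H a b c d ha hb hc hd hab hcd he
      have := H (a, b) ((mem_pvPairsD h).mpr ⟨ha, hb, hab⟩) (c, d) ((mem_pvPairsD h).mpr ⟨hc, hd, hcd⟩) he
      exact ⟨congrArg Prod.fst this, congrArg Prod.snd this⟩
    · rintro H ⟨a, b⟩ hp ⟨c, d⟩ hq he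
      obtain ⟨ha, hb, hab⟩ := (mem_pvPairsD h).mp hp
      obtain ⟨hc, hd, hcd⟩ := (mem_pvPairsD h).mp hq
      obtain ⟨h1, h2⟩ := H a b c d ha hb hc hd hab hcd he
      simp [h1, h2]
  rw [hS, hD, sum_inj_iff_diff_inj]

lemma sorted_lt_of_nodup {A : List Int} (h : A.Nodup) :
    (PySem.List.sorted A (fun x => x) false).Pairwise (· < ·) := by
  have h1 : (PySem.List.sorted A (fun x => x) false).Pairwise (· ≤ ·) := by
    simpa using PySem.List.sorted_pairwise (xs := A) (key := fun x => x)
  have h2 : (PySem.List.sorted A (fun x => x) false).Nodup :=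
    (PySem.List.sorted_perm (xs := A) (key := fun x => x) (rev := false)).nodup_iff.mpr h
  exact (h1.and h2).imp (fun ⟨hle, hne⟩ => lt_of_le_of_ne hle hne)

-- ===== VERDICT (by name: the statement is the Claim_ definition above) =====
theorem is_sidon_spec : Claim_equal_is_sidon := by
  intro A _ hpre
  unfold Spec_is_sidon
  rw [is_sidon_eq, is_sidon_alt_eq, decide_eq_decide]
  exact nodup_sums_iff_nodup_diffs (sorted_lt_of_nodup hpre)
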